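-- pv_equiv track=rewrite | github.com/umar1997/monitoring-alert-system | web/search_utils/scrape_data.py | get_number_of_chunks
-- ===== SOURCE A (Python) =====
-- import math
--
-- def get_number_of_chunks(text, character_threshold):
--     if len(text) <= character_threshold:
--         return 1
--     else:
--         chunk_number = 1
--         while True:
--             div = math.ceil(len(text)/chunk_number)
--             if div <  character_threshold:
--                 break
--             else:
--                 chunk_number += 1
--         return chunk_number
-- ===== SOURCE B (Python) =====
-- def get_number_of_chunks(text, character_threshold):
--     n = len(text)
--     if n <= character_threshold:
--         return 1
--     # smallest k with ceil(n/k) < threshold, i.e. k = ceil(n / (threshold - 1))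
--     return -(-n // (character_threshold - 1))
-- ===== Notes on version B (the rewrite author's own statement) =====
-- stated objective: simpler
-- what changed: Replaces the linear trial loop over chunk counts with a closed-form integer ceiling division ceil(n/(threshold-1)); Pre_ excludes only inputs where A loops forever (threshold <= 1 with nonempty text, or negative threshold with empty text).
import Mathlib
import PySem

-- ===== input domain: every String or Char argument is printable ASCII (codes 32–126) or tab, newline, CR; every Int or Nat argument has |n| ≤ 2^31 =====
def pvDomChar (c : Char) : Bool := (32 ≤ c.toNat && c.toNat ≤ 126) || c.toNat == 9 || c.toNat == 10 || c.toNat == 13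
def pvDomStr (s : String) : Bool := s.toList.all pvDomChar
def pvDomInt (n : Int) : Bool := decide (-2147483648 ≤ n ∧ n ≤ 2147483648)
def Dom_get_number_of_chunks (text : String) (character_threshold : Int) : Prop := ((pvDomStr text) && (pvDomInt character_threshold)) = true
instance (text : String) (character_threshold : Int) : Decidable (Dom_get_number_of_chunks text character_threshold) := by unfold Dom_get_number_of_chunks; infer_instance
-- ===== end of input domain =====

-- B replaces A's trial loop over chunk counts by the closed-form ceiling division ceil(n/(threshold-1)) (simpler).


-- ===== PORT A =====
-- math.ceil(n/c) with float division is exact for 0 ≤ n ≤ 2^31 and 1 ≤ c (53-bit mantissa),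
-- so it is ported as the integer ceiling -((-n) // c).
-- A's 'while True' loop is ported with fuel n+1 (a pure totality guard: under
-- Pre_ the loop breaks at chunk_number ≤ n+1, so the fuel is never exhausted).
def pvLoopA (n t : Int) : Nat → Int → Int
  | 0, c => c
  | f + 1, c =>
    if -(PySem.Int.floordiv (-n) c) < t then c
    else pvLoopA n t f (c + 1)

def get_number_of_chunks (text : String) (character_threshold : Int) : Int :=
  let n := PySem.Str.len text
  if n ≤ character_threshold then 1
  else pvLoopA n character_threshold (n.toNat + 1) 1

-- ===== PORT B =====
def get_number_of_chunks_alt (text : String) (character_threshold : Int) : Int :=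
  let n := PySem.Str.len text
  if n ≤ character_threshold then 1
  else -(PySem.Int.floordiv (-n) (character_threshold - 1))

-- ===== PRECONDITION & SPEC =====
-- Pre_ excludes exactly the inputs on which A's while-loop never breaks (it diverges):
-- nonempty text with character_threshold ≤ 1, and empty text with character_threshold < 0.
def Pre_get_number_of_chunks (text : String) (character_threshold : Int) : Prop :=
  (PySem.Str.len text = 0 → 0 ≤ character_threshold) ∧
  (0 < PySem.Str.len text → 2 ≤ character_threshold)
instance (text : String) (character_threshold : Int) : Decidable (Pre_get_number_of_chunks text character_threshold) := by unfold Pre_get_number_of_chunks; infer_instance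

def pvWitness_get_number_of_chunks : String × Int := ("hello world", 4)

def Spec_get_number_of_chunks (text : String) (character_threshold : Int) (out : Int) : Prop := out = get_number_of_chunks_alt text character_threshold
instance (text : String) (character_threshold : Int) (out : Int) : Decidable (Spec_get_number_of_chunks text character_threshold out) := by unfold Spec_get_number_of_chunks; infer_instance

-- ===== CLAIM (what is proved, stated in full; the proofs are below) =====
def Claim_equal_get_number_of_chunks : Prop := ∀ (text : String) (character_threshold : Int), Dom_get_number_of_chunks text character_threshold → Pre_get_number_of_chunks text character_threshold → Spec_get_number_of_chunks text character_threshold (get_number_of_chunks text character_threshold)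

-- ===== LEMMAS AND PROOFS =====

-- the loop's break condition ceil(n/c) < t is equivalent to n ≤ (t-1)*c (for c > 0)
theorem pv_cond_iff (n t c : Int) (hc : 0 < c) :
    (-(PySem.Int.floordiv (-n) c) < t ↔ n ≤ (t - 1) * c) := by
  constructor
  · intro h
    have h1 : -t + 1 ≤ PySem.Int.floordiv (-n) c := by omega
    have h2 := (PySem.Int.le_floordiv_iff_mul_le (a := -n) (b := c) (q := -t + 1) hc).mp h1
    nlinarith
  · intro h
    have h2 : (-t + 1) * c ≤ -n := by nlinarith
    have h1 := (PySem.Int.le_floordiv_iff_mul_le (a := -n) (b := c) (q := -t + 1) hc).mpr h2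
    omega

theorem pv_loop_eq (n t K : Int) (ht : 2 ≤ t)
    (hK1 : (K - 1) * (t - 1) < n) (hK2 : n ≤ K * (t - 1)) :
    ∀ (f : Nat) (c : Int), 0 < c → c ≤ K → K + 1 ≤ c + (f : Int) →
      pvLoopA n t f c = K := by
  intro f
  induction f with
  | zero => intro c _ hcK hfuel; simp at hfuel; omega
  | succ f ih =>
    intro c hc hcK hfuel
    have hcond : (-(PySem.Int.floordiv (-n) c) < t ↔ K ≤ c) := by
      rw [pv_cond_iff n t c hc]
      constructor
      · intro h
        by_contra hlt
        push Not at hlt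
        nlinarith
      · intro h; nlinarith
    simp only [pvLoopA]
    by_cases hb : -(PySem.Int.floordiv (-n) c) < t
    · rw [if_pos hb]
      have := hcond.mp hb
      omega
    · rw [if_neg hb]
      have hKc : ¬ K ≤ c := fun h => hb (hcond.mpr h)
      exact ih (c + 1) (by omega) (by omega) (by push_cast at hfuel ⊢; omega)

-- ===== VERDICT (by name: the statement is the Claim_ definition above) =====
theorem get_number_of_chunks_spec : Claim_equal_get_number_of_chunks := by
  intro text t _ hpre
  unfold Spec_get_number_of_chunks get_number_of_chunks get_number_of_chunks_alt
  set n := PySem.Str.len text with hn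
  by_cases hle : n ≤ t
  · simp [hle]
  · rw [if_neg hle, if_neg hle]
    have hn0 : 0 ≤ n := by
      simp [hn, PySem.Str.len]
    have ht : 2 ≤ t := by
      by_cases h0 : n = 0
      · exact absurd (hpre.1 h0) (by omega)
      · exact hpre.2 (by omega)
    set K := -(PySem.Int.floordiv (-n) (t - 1)) with hKdef
    have hKspec := (PySem.Int.neg_floordiv_neg_eq_iff_of_pos (a := n) (b := t - 1) (q := K) (by omega)).mp rfl
    obtain ⟨hK1, hK2⟩ := hKspec
    have hKpos : 0 < K := by nlinarith
    have hKle : K ≤ n := by nlinarith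
    exact pv_loop_eq n t K ht hK1 hK2 (n.toNat + 1) 1 (by omega) (by omega)
      (by push_cast; omega)
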